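-- pv_equiv track=rewrite | github.com/gddickinson/organic_chemistry_tutor | orgchem/core/hrms.py | _hill_formula
-- ===== SOURCE A (Python) =====
-- from typing import Dict, Iterator, List, Optional, Sequence, Tuple
--
-- _HILL_PRIORITY = ["C", "H", "N", "O", "S", "P",
--                   "F", "Cl", "Br", "I"]
--
-- def _hill_formula(counts: Dict[str, int]) -> str:
--     parts: List[str] = []
--     for e in _HILL_PRIORITY:
--         n = counts.get(e, 0)
--         if n > 0:
--             parts.append(e if n == 1 else f"{e}{n}")
--     # Any element not in the priority list (none by default) trails.
--     for e in sorted(counts):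
--         if e in _HILL_PRIORITY:
--             continue
--         n = counts[e]
--         if n > 0:
--             parts.append(e if n == 1 else f"{e}{n}")
--     return "".join(parts)
-- ===== SOURCE B (Python) =====
-- _HILL_PRIORITY = ["C", "H", "N", "O", "S", "P",
--                   "F", "Cl", "Br", "I"]
-- _HILL_INDEX = {e: i for i, e in enumerate(_HILL_PRIORITY)}
--
-- def _hill_formula(counts):
--     # One sort of all keys under a composite (priority-index, name) key,
--     # then a single emit pass.
--     parts = []
--     for e in sorted(counts, key=lambda e: (_HILL_INDEX.get(e, len(_HILL_PRIORITY)), e)):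
--         n = counts[e]
--         if n > 0:
--             parts.append(e if n == 1 else f"{e}{n}")
--     return "".join(parts)
-- ===== Notes on version B (the rewrite author's own statement) =====
-- stated objective: simpler
-- what changed: A's two emission passes (fixed priority-list loop, then a sorted-keys loop that skips priority elements) are replaced by one sort of all keys under a composite (priority-index, name) key followed by a single emit pass.
import Mathlib
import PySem

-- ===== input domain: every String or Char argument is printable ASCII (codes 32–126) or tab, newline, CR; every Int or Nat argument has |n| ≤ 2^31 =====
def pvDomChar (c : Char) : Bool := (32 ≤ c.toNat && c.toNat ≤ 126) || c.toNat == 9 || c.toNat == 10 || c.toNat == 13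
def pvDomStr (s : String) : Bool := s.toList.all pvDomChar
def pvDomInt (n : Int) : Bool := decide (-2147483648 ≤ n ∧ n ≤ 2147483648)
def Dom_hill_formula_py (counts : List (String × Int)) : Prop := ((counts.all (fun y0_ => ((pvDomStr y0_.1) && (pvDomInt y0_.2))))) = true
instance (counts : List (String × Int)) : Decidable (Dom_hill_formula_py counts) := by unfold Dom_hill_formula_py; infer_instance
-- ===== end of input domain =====

-- B replaces A's two emission passes (fixed priority loop + sorted remainder loop with a
-- skip) by one sort of all keys under a composite (priority-index, name) key and a single
-- emit pass (objective: simpler).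

-- ===== PORT A =====
-- _HILL_PRIORITY
def pvHill : List String := ["C", "H", "N", "O", "S", "P", "F", "Cl", "Br", "I"]

def hill_formula_py (counts : List (String × Int)) : String :=
  let d := PySem.Dict.ofList counts
  -- for e in _HILL_PRIORITY: n = counts.get(e, 0); if n > 0: parts.append(e if n == 1 else f"{e}{n}")
  let parts : List String :=
    pvHill.foldl (fun parts e =>
      let n := d.getD e 0
      if 0 < n then parts ++ [if n = 1 then e else e ++ PySem.Int.toStr n] else parts) []
  -- for e in sorted(counts): if e in _HILL_PRIORITY: continue; n = counts[e]; if n > 0: append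
  -- (e is always a key of counts here, so counts[e] never raises; get-with-default-0 is exact)
  let parts :=
    (PySem.List.sorted d.keys (fun x => x) false).foldl (fun parts e =>
      if pvHill.contains e then parts
      else
        let n := d.getD e 0
        if 0 < n then parts ++ [if n = 1 then e else e ++ PySem.Int.toStr n] else parts) parts
  PySem.Str.join "" parts

-- ===== PORT B =====
-- _HILL_INDEX = {e: i for i, e in enumerate(_HILL_PRIORITY)} (the comprehension's result, as a literal)
def pvHillIndex : PySem.Dict String Int :=
  PySem.Dict.ofList [("C", 0), ("H", 1), ("N", 2), ("O", 3), ("S", 4),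
                     ("P", 5), ("F", 6), ("Cl", 7), ("Br", 8), ("I", 9)]

def hill_formula_py_alt (counts : List (String × Int)) : String :=
  let d := PySem.Dict.ofList counts
  -- for e in sorted(counts, key=lambda e: (_HILL_INDEX.get(e, len(_HILL_PRIORITY)), e)):
  --   n = counts[e]; if n > 0: parts.append(e if n == 1 else f"{e}{n}")
  let parts : List String :=
    (PySem.List.sorted2 d.keys (fun e => pvHillIndex.getD e 10) (fun e => e) false).foldl
      (fun parts e =>
        let n := d.getD e 0
        if 0 < n then parts ++ [if n = 1 then e else e ++ PySem.Int.toStr n] else parts) []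
  PySem.Str.join "" parts

-- ===== PRECONDITION & SPEC =====
def Spec_hill_formula_py (counts : List (String × Int)) (out : String) : Prop := out = hill_formula_py_alt counts
instance (counts : List (String × Int)) (out : String) : Decidable (Spec_hill_formula_py counts out) := by unfold Spec_hill_formula_py; infer_instance

-- ===== CLAIM (what is proved, stated in full; the proofs are below) =====
def Claim_equal_hill_formula_py : Prop := ∀ (counts : List (String × Int)), Dom_hill_formula_py counts → Spec_hill_formula_py counts (hill_formula_py counts)

-- ===== LEMMAS AND PROOFS =====

-- every priority element's index is below the default 10
theorem pv_hill_lt10 : ∀ e ∈ pvHill, pvHillIndex.getD e 10 < 10 := by decide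

-- the priority list is strictly increasing under its own index
theorem pv_hill_pw : pvHill.Pairwise (fun a b => pvHillIndex.getD a 10 < pvHillIndex.getD b 10) := by decide

-- non-priority elements get the default key 10
theorem pv_out10 (e : String) (h : pvHill.contains e = false) : pvHillIndex.getD e 10 = 10 := by
  apply PySem.Dict.getD_of_not_contains
  simp [pvHill] at h
  have hx : pvHillIndex = PySem.Dict.mk [("C", 0), ("H", 1), ("N", 2), ("O", 3), ("S", 4),
                     ("P", 5), ("F", 6), ("Cl", 7), ("Br", 8), ("I", 9)] := by decide
  rw [hx]
  simp [PySem.Dict.contains_mk]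
  tauto

-- filtering commutes with sorting a duplicate-free list of strings
theorem pv_filter_sorted (K : List String) (hK : K.Nodup) (q : String → Bool) :
    PySem.List.sorted (K.filter q) (fun x => x) false
      = (PySem.List.sorted K (fun x => x) false).filter q := by
  apply PySem.List.sorted_eq_of_perm_of_pairwise_lt
  · exact (PySem.List.sorted_perm K (fun x => x) false).filter q
  · have hle : ((PySem.List.sorted K (fun x => x) false).filter q).Pairwise (fun a b => a ≤ b) :=
      (PySem.List.sorted_pairwise K (fun x => x)).sublist List.filter_sublist
    have hnd : ((PySem.List.sorted K (fun x => x) false).filter q).Nodup :=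
      (((PySem.List.sorted_perm K (fun x => x) false).nodup_iff).mpr hK).filter q
    exact (hle.and hnd).imp (fun h => lt_of_le_of_ne h.1 h.2)

-- sorted2's pair comparator is the lexicographic order on the key pair
theorem pv_lt_lex {κ₁ κ₂ : Type} [LinearOrder κ₁] [LinearOrder κ₂] (p q : κ₁ × κ₂) :
    (decide (p.1 < q.1) || (!decide (q.1 < p.1) && decide (p.2 < q.2)))
      = decide (toLex p < toLex q) := by
  rcases lt_trichotomy p.1 q.1 with h | h | h
  · simp [Prod.Lex.lt_iff, h]
  · simp [Prod.Lex.lt_iff, h]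
  · simp [Prod.Lex.lt_iff, h, lt_asymm h, ne_of_gt h]

-- so sorted2 over linear orders is `sorted` under the lexicographic key
theorem pv_sorted2_eq_sorted_lex {α κ₁ κ₂ : Type} [LinearOrder κ₁] [LinearOrder κ₂]
    (xs : List α) (k1 : α → κ₁) (k2 : α → κ₂) :
    PySem.List.sorted2 xs k1 k2 false
      = PySem.List.sorted xs (fun x => toLex (k1 x, k2 x)) false := by
  rw [PySem.List.sorted_eq_foldl_insertBy]
  show List.foldl _ [] xs = _
  have hc : (fun a b => decide (k1 a < k1 b) || (!decide (k1 b < k1 a) && decide (k2 a < k2 b)))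
      = (fun a b : α => decide (toLex (k1 a, k2 a) < toLex (k1 b, k2 b))) := by
    funext a b; exact pv_lt_lex (k1 a, k2 a) (k1 b, k2 b)
  simp only [if_neg (by simp : ¬(false = true)), hc]

-- B's composite-key sort of the (duplicate-free) key list is: present priority elements in
-- priority order, then the remaining keys in alphabetical order
theorem pv_sorted_keys (K : List String) (hK : K.Nodup) :
    PySem.List.sorted2 K (fun e => pvHillIndex.getD e 10) (fun e => e) false
      = pvHill.filter (fun e => K.contains e)
        ++ PySem.List.sorted (K.filter (fun e => !pvHill.contains e)) (fun x => x) false := by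
  rw [pv_sorted2_eq_sorted_lex]
  apply PySem.List.sorted_eq_of_perm_of_pairwise_lt
  · -- permutation
    have h1 : (pvHill.filter (fun e => K.contains e)).Perm
        (K.filter (fun e => pvHill.contains e)) := by
      rw [List.perm_ext_iff_of_nodup ((by decide : pvHill.Nodup).filter _) (hK.filter _)]
      intro a
      simp [List.mem_filter, and_comm]
    have h2 : (PySem.List.sorted (K.filter (fun e => !pvHill.contains e)) (fun x => x) false).Perm
        (K.filter (fun e => !pvHill.contains e)) := PySem.List.sorted_perm _ _ _
    exact (h1.append h2).trans (List.filter_append_perm _ K)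
  · -- strictly increasing under the lexicographic key
    rw [List.pairwise_append]
    refine ⟨?_, ?_, ?_⟩
    · refine ((pv_hill_pw.sublist List.filter_sublist).imp ?_)
      intro a b h
      exact Prod.Lex.lt_iff.mpr (Or.inl h)
    · have hle := (PySem.List.sorted_pairwise (K.filter (fun e => !pvHill.contains e)) (fun x => x))
      have hnd : (PySem.List.sorted (K.filter (fun e => !pvHill.contains e)) (fun x => x) false).Nodup :=
        ((PySem.List.sorted_perm _ _ _).nodup_iff).mpr (hK.filter _)
      refine List.Pairwise.imp_of_mem ?_ (hle.and hnd)
      intro a b ha hb h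
      have ha' : pvHill.contains a = false := by
        have := (List.mem_filter.mp ((PySem.List.mem_sorted _ _ _ _).mp ha)).2
        simpa using this
      have hb' : pvHill.contains b = false := by
        have := (List.mem_filter.mp ((PySem.List.mem_sorted _ _ _ _).mp hb)).2
        simpa using this
      refine Prod.Lex.lt_iff.mpr (Or.inr ⟨?_, lt_of_le_of_ne h.1 h.2⟩)
      show pvHillIndex.getD a 10 = pvHillIndex.getD b 10
      rw [pv_out10 a ha', pv_out10 b hb']
    · intro a ha b hb
      have ha' : a ∈ pvHill := (List.mem_filter.mp ha).1
      have hb' : pvHill.contains b = false := by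
        have := (List.mem_filter.mp ((PySem.List.mem_sorted _ _ _ _).mp hb)).2
        simpa using this
      refine Prod.Lex.lt_iff.mpr (Or.inl ?_)
      show pvHillIndex.getD a 10 < pvHillIndex.getD b 10
      rw [pv_out10 b hb']
      exact pv_hill_lt10 a ha'

-- the two ports agree on every input
theorem pv_main (counts : List (String × Int)) :
    hill_formula_py counts = hill_formula_py_alt counts := by
  simp only [hill_formula_py, hill_formula_py_alt]
  set d := PySem.Dict.ofList counts with hd
  set K := d.keys with hKdef
  have hK : K.Nodup := PySem.Dict.nodup_keys_ofList counts
  set emit : String → String := fun e => if d.getD e 0 = 1 then e else e ++ PySem.Int.toStr (d.getD e 0) with hemit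
  set pos : String → Prop := fun e => 0 < d.getD e 0 with hpos
  congr 1
  -- first loop of A: append-if over the priority list
  rw [PySem.List.foldl_append_ite (p := pos) (f := emit)]
  -- second loop of A: normalise the continue-shaped body, then fold to filter
  rw [PySem.List.foldl_congr_mem' (PySem.List.sorted K (fun x => x) false)
        (fun parts e =>
          if pvHill.contains e = true then parts
          else if 0 < d.getD e 0 then parts ++ [if d.getD e 0 = 1 then e else e ++ PySem.Int.toStr (d.getD e 0)] else parts)
        (fun parts e => if (!pvHill.contains e && decide (pos e)) = true then parts ++ [emit e] else parts)
        _
        (by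
          intro e he parts
          by_cases h1 : e ∈ pvHill <;> by_cases h2 : 0 < d.getD e 0 <;>
            simp [h1, h2, hemit, hpos])]
  rw [PySem.List.foldl_append_if]
  -- B's single loop
  rw [PySem.List.foldl_append_ite (p := pos) (f := emit)]
  rw [pv_sorted_keys K hK]
  rw [List.filter_append, List.map_append, List.filter_filter]
  simp only [List.nil_append]
  have hposmem : ∀ e, decide (pos e) = true → K.contains e = true := by
    intro e h2
    by_contra hc
    simp only [Bool.not_eq_true] at hc
    have hdc : d.contains e = false := by
      rw [PySem.Dict.contains_eq_decide_mem_keys]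
      simpa using hc
    have h0 := PySem.Dict.getD_of_not_contains (d := d) (k := e) (d0 := (0:Int)) hdc
    simp only [hpos, decide_eq_true_eq] at h2
    omega
  congr 2
  · -- positive priority elements are keys, so the membership test is redundant
    apply List.filter_congr
    intro e he
    by_cases h2 : decide (pos e) = true
    · simp [h2]
      simpa using hposmem e h2
    · simp only [Bool.not_eq_true] at h2
      simp [h2]
  · -- sorting then dropping priority elements = sorting the non-priority keys
    rw [pv_filter_sorted K hK, List.filter_filter]
    apply List.filter_congr
    intro e he
    exact Bool.and_comm _ _

-- ===== VERDICT (by name: the statement is the Claim_ definition above) =====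
theorem hill_formula_py_spec : Claim_equal_hill_formula_py := by
  intro counts _
  unfold Spec_hill_formula_py
  exact pv_main counts
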